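-- pv_equiv track=rewrite | github.com/dongyeforever/keymap-pages | clients/cli/keymap_cli.py | format_keymap
-- ===== SOURCE A (Python) =====
-- from typing import Optional
--
-- def format_keymap(content: str, category: Optional[str] = None) -> str:
--     """Format keymap content for display."""
--     lines = content.split("\n")
--     output = []
--     current_category = None
--
--     for line in lines:
--         if line.startswith("## "):
--             current_category = line[3:]
--             if category and current_category != category:
--                 current_category = None
--             if category and current_category == category:
--                 output.append(line)
--         elif current_category is not None or category is None:
--             output.append(line)
--
--     return "\n".join(output)
-- ===== SOURCE B (Python) =====
-- from typing import Optional
--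
--
-- def _split_sections(lines):
--     """Split lines into sections: a leading (None, preamble) section, then one
--     (header_suffix, body_lines) section per '## ' header line."""
--     sections = [(None, [])]
--     for line in lines:
--         if line.startswith("## "):
--             sections.append((line[3:], []))
--         else:
--             sections[-1][1].append(line)
--     return sections
--
--
-- def format_keymap(content: str, category: Optional[str] = None) -> str:
--     """Format keymap content for display."""
--     out = []
--     for header, body in _split_sections(content.split("\n")):
--         if category is None:
--             out.extend(body)
--         elif header == category:
--             out.append("## " + header)
--             out.extend(body)
--     return "\n".join(out)
-- ===== Notes on version B (the rewrite author's own statement) =====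
-- stated objective: alternative
-- what changed: B replaces A's single stateful filter loop (a current_category flag mutated per line) with a two-phase decomposition: parse the lines into (header, body) sections, then emit bodies (category None) or the matching sections with their header line; Pre_ excludes the empty-string category, an unspecified corner where A's truthiness-based handling (emit every body, no headers) and B's literal-match handling (emit sections titled '') are both defensible.
-- outside the precondition, e.g. on format_keymap('## X\na', ''): A returns 'a', B returns ''
import Mathlib
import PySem

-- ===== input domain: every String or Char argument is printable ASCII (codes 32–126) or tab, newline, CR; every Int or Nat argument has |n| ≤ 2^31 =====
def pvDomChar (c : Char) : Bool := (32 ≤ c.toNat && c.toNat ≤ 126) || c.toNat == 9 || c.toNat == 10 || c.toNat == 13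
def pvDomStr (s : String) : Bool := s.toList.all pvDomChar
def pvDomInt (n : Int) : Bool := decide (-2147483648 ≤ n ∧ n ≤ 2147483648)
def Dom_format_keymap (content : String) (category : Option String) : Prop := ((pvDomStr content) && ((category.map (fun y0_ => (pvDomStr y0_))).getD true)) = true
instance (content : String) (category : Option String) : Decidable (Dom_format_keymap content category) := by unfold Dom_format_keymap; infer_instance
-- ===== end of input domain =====

-- B re-implements A's single stateful filter loop as parse-into-sections + category-directed emit;
-- same asymptotic cost ("alternative" objective): a different decomposition, not a speed claim.

-- ===== PORT A =====
-- Python truthiness of the Optional[str] `category`: None and "" are falsy.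
def pyTruthyStr (c : Option String) : Bool :=
  match c with
  | none => false
  | some s => decide (s ≠ "")

-- literal transliteration of A: one foldl over the lines with state (output, current_category)
def format_keymap (content : String) (category : Option String) : String :=
  let lines := (PySem.Str.split? content "\n").getD []   -- sep "\n" ≠ "", so split? is `some` here
  let st := lines.foldl (fun (st : List String × Option String) line =>
    if PySem.Str.startswith line "## " then
      let cur : Option String := some (PySem.Str.slice line (some 3) none)
      let cur := if pyTruthyStr category && cur ≠ category then none else cur
      let out := if pyTruthyStr category && cur == category then st.1 ++ [line] else st.1
      (out, cur)
    else if st.2.isSome || category.isNone then (st.1 ++ [line], st.2)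
    else st) ([], none)
  PySem.Str.join "\n" st.1

-- ===== PORT B =====
-- _split_sections: a foldl appending a fresh section per header line and
-- extending the last section's body otherwise (`sections[-1][1].append(line)`)
def splitSections (lines : List String) : List (Option String × List String) :=
  lines.foldl (fun secs line =>
    if PySem.Str.startswith line "## " then
      secs ++ [(some (PySem.Str.slice line (some 3) none), [])]
    else
      secs.dropLast ++ [((secs.getLastD (none, [])).1, (secs.getLastD (none, [])).2 ++ [line])])
    [(none, [])]

-- literal transliteration of B: split into sections, then emit per category
def format_keymap_alt (content : String) (category : Option String) : String :=
  let lines := (PySem.Str.split? content "\n").getD []   -- sep "\n" ≠ "", so split? is `some` here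
  let out := (splitSections lines).foldl (fun out sec =>
    match category with
    | none => out ++ sec.2
    | some cat =>
      match sec.1 with
      | some h => if h = cat then (out ++ [("## " ++ h)]) ++ sec.2 else out
      | none => out) []
  PySem.Str.join "\n" out

-- ===== PRECONDITION & SPEC =====
-- Pre_ excludes only the empty-string category: an unspecified corner where A's
-- truthiness-based handling (every body line, no headers) and B's literal-match
-- handling (sections whose header suffix is "") are both defensible readings.
def Pre_format_keymap (content : String) (category : Option String) : Prop :=
  category ≠ some ""
instance (content : String) (category : Option String) : Decidable (Pre_format_keymap content category) := by unfold Pre_format_keymap; infer_instance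
def pvWitness_format_keymap : String × Option String := ("## X\nC-a : left", some "X")

def Spec_format_keymap (content : String) (category : Option String) (out : String) : Prop := out = format_keymap_alt content category
instance (content : String) (category : Option String) (out : String) : Decidable (Spec_format_keymap content category out) := by unfold Spec_format_keymap; infer_instance

-- ===== CLAIM (what is proved, stated in full; the proofs are below) =====
def Claim_equal_format_keymap : Prop := ∀ (content : String) (category : Option String), Dom_format_keymap content category → Pre_format_keymap content category → Spec_format_keymap content category (format_keymap content category)

-- ===== LEMMAS AND PROOFS =====

-- front-recursive characterisation of B's parse: (preamble, [(suffix, body)])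
def parseRec (lines : List String) : List String × List (String × List String) :=
  match lines with
  | [] => ([], [])
  | l :: ls =>
    let ps := parseRec ls
    if PySem.Str.startswith l "## " then ([], (PySem.Str.slice l (some 3) none, ps.1) :: ps.2)
    else (l :: ps.1, ps.2)

-- front-recursive characterisation of A's loop (output only; cur is the running current_category)
def aRec (category : Option String) (cur : Option String) (lines : List String) : List String :=
  match lines with
  | [] => []
  | l :: ls =>
    if PySem.Str.startswith l "## " then
      let c : Option String := some (PySem.Str.slice l (some 3) none)
      let c := if pyTruthyStr category && c ≠ category then none else c
      if pyTruthyStr category && c == category then l :: aRec category c ls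
      else aRec category c ls
    else if cur.isSome || category.isNone then l :: aRec category cur ls
    else aRec category cur ls

-- what A emits from the parsed sections, per category
def emitSecs (category : Option String) (secs : List (String × List String)) : List String :=
  match category with
  | none => secs.flatMap (fun sec => sec.2)
  | some cat =>
    if cat = "" then secs.flatMap (fun sec => sec.2)
    else secs.flatMap (fun sec => if sec.1 = cat then ("## " ++ sec.1) :: sec.2 else [])

theorem splitSections_inv (lines : List String)
    (acc : List (Option String × List String)) (h : Option String) (b : List String) :
    List.foldl (fun secs line =>
      if PySem.Str.startswith line "## " then
        secs ++ [(some (PySem.Str.slice line (some 3) none), [])]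
      else
        secs.dropLast ++ [((secs.getLastD (none, [])).1, (secs.getLastD (none, [])).2 ++ [line])])
      (acc ++ [(h, b)]) lines
    = acc ++ [(h, b ++ (parseRec lines).1)]
        ++ (parseRec lines).2.map (fun p => (some p.1, p.2)) := by
  induction lines generalizing acc h b with
  | nil => simp [parseRec]
  | cons l ls ih =>
    rw [List.foldl_cons]
    cases hl : PySem.Str.startswith l "## " with
    | true =>
      have hl' : PySem.Chars.startswith l.toList ['#', '#', ' '] = true := by
        have e : "## ".toList = ['#', '#', ' '] := rfl
        simpa [PySem.Str.startswith_eq, e] using hl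
      rw [if_pos rfl, ih]
      simp [parseRec, PySem.Str.startswith_eq, hl']
    | false =>
      have hl' : PySem.Chars.startswith l.toList ['#', '#', ' '] = false := by
        have e : "## ".toList = ['#', '#', ' '] := rfl
        simpa [PySem.Str.startswith_eq, e] using hl
      rw [if_neg (by simp)]
      have h1 : ((acc ++ [(h, b)]).getLastD (none, [])) = (h, b) := by
        simp [List.getLastD_eq_getLast?]
      have h2 : (acc ++ [(h, b)]).dropLast = acc := by simp
      rw [h1, h2, ih]
      simp [parseRec, PySem.Str.startswith_eq, hl']

theorem splitSections_eq (lines : List String) :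
    splitSections lines
      = (none, (parseRec lines).1)
          :: (parseRec lines).2.map (fun p => (some p.1, p.2)) := by
  have := splitSections_inv lines [] none []
  simpa [splitSections] using this

theorem aLoop_eq_aRec (category : Option String) (lines : List String)
    (st : List String × Option String) :
    (lines.foldl (fun (st : List String × Option String) line =>
      if PySem.Str.startswith line "## " then
        let cur : Option String := some (PySem.Str.slice line (some 3) none)
        let cur := if pyTruthyStr category && cur ≠ category then none else cur
        let out := if pyTruthyStr category && cur == category then st.1 ++ [line] else st.1
        (out, cur)
      else if st.2.isSome || category.isNone then (st.1 ++ [line], st.2)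
      else st) st).1 = st.1 ++ aRec category st.2 lines := by
  induction lines generalizing st with
  | nil => simp [aRec]
  | cons l ls ih =>
    rw [List.foldl_cons, ih]
    show _ = st.1 ++ aRec category st.2 (l :: ls)
    conv_rhs => rw [aRec]
    simp only []
    split_ifs <;> simp

-- a header line is "## " followed by its suffix
theorem header_recombine (l : String) (h : PySem.Str.startswith l "## " = true) :
    "## " ++ PySem.Str.slice l (some 3) none = l := by
  apply String.toList_inj.mp
  have hp : ("## ".toList) <+: l.toList := by
    have := PySem.Str.startswith_eq l "## "
    rw [this] at h
    exact (PySem.Chars.startswith_iff _ _).mp h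
  obtain ⟨t, ht⟩ := hp
  have hs : (PySem.Str.slice l (some 3) none).toList = l.toList.drop 3 := by
    rw [PySem.Str.toList_slice]
    simp only [PySem.Chars.slice_eq_listSlice]
    rw [PySem.List.slice_from l.toList (by norm_num : (0:Int) ≤ 3)]
    rfl
  rw [String.toList_append, hs, ← ht]
  simp

-- main invariant: A's recursion = preamble guard + section emission of parseRec
theorem aRec_eq_emit (category : Option String) (lines : List String) (cur : Option String) :
    aRec category cur lines =
      (if cur.isSome || category.isNone then (parseRec lines).1 else [])
        ++ emitSecs category (parseRec lines).2 := by
  induction lines generalizing cur with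
  | nil =>
    cases category with
    | none => simp [aRec, parseRec, emitSecs]
    | some cat => by_cases hc : cat = "" <;> simp [aRec, parseRec, emitSecs, hc]
  | cons l ls ih =>
    rw [aRec, parseRec]
    cases h : PySem.Str.startswith l "## " with
    | false =>
      simp only [Bool.false_eq_true, if_neg (by simp : ¬ False)]
      cases hcond : (cur.isSome || category.isNone) <;>
        simp [hcond, ih cur]
    | true =>
      simp only []
      cases category with
      | none =>
        simp only [pyTruthyStr, Bool.false_and, Bool.false_eq_true,
          if_neg (by simp : ¬ False)]
        rw [ih (some (PySem.Str.slice l (some 3) none))]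
        simp [emitSecs]
      | some cat =>
        by_cases hc : cat = ""
        · have hfalse : pyTruthyStr (some cat) = false := by simp [pyTruthyStr, hc]
          simp only [hfalse, Bool.false_and, Bool.false_eq_true,
            if_neg (by simp : ¬ False)]
          rw [ih (some (PySem.Str.slice l (some 3) none))]
          simp [emitSecs, hc]
        · have htrue : pyTruthyStr (some cat) = true := by simp [pyTruthyStr, hc]
          by_cases hm : PySem.Str.slice l (some 3) none = cat
          · -- matching header: kept, and the section body follows
            rw [if_neg (by simp [hm] : ¬ (pyTruthyStr (some cat) &&
                (some (PySem.Str.slice l (some 3) none) ≠ some cat : Bool)) = true)]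
            rw [if_pos (by simp [pyTruthyStr, hc, hm] : (pyTruthyStr (some cat) &&
                (some (PySem.Str.slice l (some 3) none) == some cat)) = true)]
            rw [ih (some (PySem.Str.slice l (some 3) none))]
            simp only [emitSecs, if_neg hc]
            have hl : ("## " ++ cat) = l := by rw [← hm]; exact header_recombine l h
            simp [hm, hl]
          · -- non-matching header: current_category reset to None
            rw [if_pos (by simp [htrue, hm] : (pyTruthyStr (some cat) &&
                (some (PySem.Str.slice l (some 3) none) ≠ some cat : Bool)) = true)]
            rw [if_neg (by simp : ¬ (pyTruthyStr (some cat) &&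
                ((none : Option String) == some cat)) = true)]
            rw [ih none]
            simp only [emitSecs, if_neg hc]
            simp [hm]

-- B's emit foldl over the mapped sections is a flatMap
theorem emit_foldl_none (secs : List (String × List String)) (acc pre : List String) :
    List.foldl (fun out (sec : Option String × List String) => out ++ sec.2)
      acc ((none, pre) :: secs.map (fun p => (some p.1, p.2)))
    = acc ++ pre ++ secs.flatMap (fun sec => sec.2) := by
  rw [List.foldl_cons]
  induction secs generalizing acc pre with
  | nil => simp
  | cons s ss ih => simp [ih]

theorem emit_foldl_some (cat : String) (secs : List (String × List String)) (acc : List String) :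
    List.foldl (fun out (sec : Option String × List String) =>
      match sec.1 with
      | some h => if h = cat then (out ++ [("## " ++ h)]) ++ sec.2 else out
      | none => out)
      acc (secs.map (fun p => (some p.1, p.2)))
    = acc ++ secs.flatMap (fun sec => if sec.1 = cat then ("## " ++ sec.1) :: sec.2 else []) := by
  induction secs generalizing acc with
  | nil => simp
  | cons s ss ih =>
    rw [List.map_cons, List.foldl_cons]
    show List.foldl _ (if s.1 = cat then (acc ++ [("## " ++ s.1)]) ++ s.2 else acc) _ = _
    by_cases hs : s.1 = cat
    · rw [if_pos hs, ih]; simp [hs]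
    · rw [if_neg hs, ih]; simp [hs]

-- ===== VERDICT (by name: the statement is the Claim_ definition above) =====
theorem format_keymap_spec : Claim_equal_format_keymap := by
  intro content category _ hpre
  unfold Spec_format_keymap format_keymap format_keymap_alt
  simp only []
  congr 1
  rw [aLoop_eq_aRec, List.nil_append, aRec_eq_emit, splitSections_eq]
  cases category with
  | none => rw [emit_foldl_none]; simp [emitSecs]
  | some cat =>
    have hc : cat ≠ "" := fun h => hpre (by rw [h])
    rw [List.foldl_cons]
    simp only []
    rw [emit_foldl_some]
    simp [emitSecs, hc]
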